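-- pv_equiv track=rewrite | github.com/jasonmpittman/coding-exercises | exercises/sum_sequence.py | sum_sequence
-- ===== SOURCE A (Python) =====
-- def sum_sequence(n: int) -> list:
--     sequence = []
--
--     for i in range(1, abs(n) + 2):
--         m = sum([x for x in range(1, i)])
--
--         if n < 0:
--             sequence.append(m * -1)
--         else:
--             sequence.append(m)
--
--     return sequence
-- ===== SOURCE B (Python) =====
-- def sum_sequence(n: int) -> list:
--     sign = -1 if n < 0 else 1
--     return [sign * k * (k + 1) // 2 for k in range(abs(n) + 1)]
-- ===== Notes on version B (the rewrite author's own statement) =====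
-- stated objective: faster
-- what changed: Replaced the per-element inner sum(range(1,i)) rebuild with the closed-form triangular number k*(k+1)//2 in a single comprehension.
import Mathlib
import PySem

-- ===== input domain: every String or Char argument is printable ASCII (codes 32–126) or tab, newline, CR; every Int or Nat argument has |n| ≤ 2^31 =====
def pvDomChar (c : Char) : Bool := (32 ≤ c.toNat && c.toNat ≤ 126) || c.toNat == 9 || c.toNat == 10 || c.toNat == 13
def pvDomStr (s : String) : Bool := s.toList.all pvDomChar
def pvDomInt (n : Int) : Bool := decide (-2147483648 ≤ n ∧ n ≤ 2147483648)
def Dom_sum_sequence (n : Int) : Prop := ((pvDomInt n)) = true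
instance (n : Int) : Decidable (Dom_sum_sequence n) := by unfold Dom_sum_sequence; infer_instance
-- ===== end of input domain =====

-- B replaces A's per-element sum(range(1,i)) rebuild by the closed form k*(k+1)//2 (O(n) instead of O(n^2)).

-- ===== PORT A =====
def sum_sequence (n : Int) : List Int :=
  (PySem.List.pyRange 1 (|n| + 2) 1).foldl
    (fun sequence i =>
      let m := (PySem.List.pyRange 1 i 1).foldl (· + ·) 0
      if n < 0 then sequence ++ [m * -1] else sequence ++ [m])
    []

-- ===== PORT B =====
def sum_sequence_alt (n : Int) : List Int :=
  let sign : Int := if n < 0 then -1 else 1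
  (PySem.List.pyRange 0 (|n| + 1) 1).map (fun k => PySem.Int.floordiv (sign * k * (k + 1)) 2)

-- ===== PRECONDITION & SPEC =====
def Spec_sum_sequence (n : Int) (out : List Int) : Prop := out = sum_sequence_alt n
instance (n : Int) (out : List Int) : Decidable (Spec_sum_sequence n out) := by unfold Spec_sum_sequence; infer_instance

-- ===== CLAIM (what is proved, stated in full; the proofs are below) =====
def Claim_equal_sum_sequence : Prop := ∀ (n : Int), Dom_sum_sequence n → Spec_sum_sequence n (sum_sequence n)

-- ===== LEMMAS AND PROOFS =====

-- A's inner loop sum(range(1, i)) for i = 1 + k, after range normalisation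
theorem inner_sum_eq (k : Nat) :
    List.foldl (fun (x : Int) (y : Nat) => x + (1 + (y : Int))) 0 (List.range k)
      = ((k : Int) * ((k : Int) + 1)) / 2 := by
  induction k with
  | zero => simp
  | succ k ih =>
    rw [List.range_succ, List.foldl_append]
    simp only [List.foldl_cons, List.foldl_nil, ih]
    push_cast
    have h1 : ((k:Int) * ((k:Int)+1)) % 2 = 0 := Int.even_iff.mp (Int.even_mul_succ_self _)
    have h2 : (((k:Int)+1) * (((k:Int)+1)+1)) % 2 = 0 := Int.even_iff.mp (Int.even_mul_succ_self _)
    have h3 : ((k:Int)+1) * (((k:Int)+1)+1) = (k:Int) * ((k:Int)+1) + 2*((k:Int)+1) := by ring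
    omega

theorem foldl_append_map {α : Type} (g : α → Int) (l : List α) (init : List Int) :
    l.foldl (fun acc i => acc ++ [g i]) init = init ++ l.map g := by
  induction l generalizing init with
  | nil => simp
  | cons x xs ih => simp [ih]

-- ===== VERDICT (by name: the statement is the Claim_ definition above) =====
theorem sum_sequence_spec : Claim_equal_sum_sequence := by
  intro n _
  unfold Spec_sum_sequence sum_sequence sum_sequence_alt
  have hN : (|n| + 2 - 1).toNat = (|n| + 1 - 0).toNat := by omega
  by_cases hn : n < 0 <;>
    simp only [hn, if_true, if_false, PySem.List.pyRange_one, hN,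
      List.foldl_map, List.map_map, foldl_append_map, List.nil_append] <;>
  · apply List.map_congr_left
    intro k _
    simp only [Function.comp_apply]
    have hk : (1 + (k:Int) - 1).toNat = k := by omega
    rw [hk, inner_sum_eq, PySem.Int.floordiv_eq_ediv_of_pos (by norm_num)]
    have h1 : ((k:Int) * ((k:Int)+1)) % 2 = 0 := Int.even_iff.mp (Int.even_mul_succ_self _)
    first
      | (have h2 : (-1 : Int) * (0 + (k:Int)) * (0 + (k:Int) + 1) = -((k:Int)*((k:Int)+1)) := by ring
         rw [h2]; try omega)
      | (have h2 : (1 : Int) * (0 + (k:Int)) * (0 + (k:Int) + 1) = (k:Int)*((k:Int)+1) := by ring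
         rw [h2]; try omega)
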